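-- pv_equiv track=rewrite | github.com/saenyakorn/2110101-COMP-PROG | P1/P1_07_Biorhythm.py | CountDay
-- ===== SOURCE A (Python) =====
-- def CountDay(d,m,y,h):
--     month = [31,28,31,30,31,30,31,31,30,31,30,31]
--     f = lambda a : a-543
--     month[1] = 29 if (f(y)%400==0) or (f(y)%4==0 and f(y)%100) else 28
--     day = 0
--     if h==0: # now to end
--         day = month[m-1]-d+1
--         while m < len(month):
--             day += month[m]
--             m += 1
--     else: # start to now
--         day = d-1
--         for i in range(m-1):
--             day += month[i]
--     return day
-- ===== SOURCE B (Python) =====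
-- def CountDay(d, m, y, h):
--     # Day-of-year decomposition: one prefix accumulation gives doy; the two
--     # directions are then closed-form expressions in doy and the year total.
--     month = [31, 28, 31, 30, 31, 30, 31, 31, 30, 31, 30, 31]
--     g = y - 543
--     month[1] = 29 if g % 400 == 0 or (g % 4 == 0 and g % 100) else 28
--     doy = d + sum(month[i] for i in range(m - 1))
--     total = sum(month)
--     return doy - 1 if h else total - doy + 1
-- ===== Notes on version B (the rewrite author's own statement) =====
-- stated objective: simpler
-- what changed: B computes a single day-of-year quantity with one prefix accumulation and returns two closed-form expressions (doy-1 / total-doy+1), replacing A's two separate per-branch loops (a while-loop summing the remaining months and a for-loop summing the preceding ones).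
-- intended difference: For h==0 with non-positive month m (still in -11..12 so A returns), A's month[m-1] wraps around via Python negative indexing and its while-loop adds wrapped months, giving an accidental over-count (e.g. 392 at (5,0,2564,0)); B returns total-doy+1 = 361, the consistent extension of the day-of-year formula, which is the intended value. — e.g. on CountDay(5, 0, 2564, 0): A returns 392, B returns 361
import Mathlib
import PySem

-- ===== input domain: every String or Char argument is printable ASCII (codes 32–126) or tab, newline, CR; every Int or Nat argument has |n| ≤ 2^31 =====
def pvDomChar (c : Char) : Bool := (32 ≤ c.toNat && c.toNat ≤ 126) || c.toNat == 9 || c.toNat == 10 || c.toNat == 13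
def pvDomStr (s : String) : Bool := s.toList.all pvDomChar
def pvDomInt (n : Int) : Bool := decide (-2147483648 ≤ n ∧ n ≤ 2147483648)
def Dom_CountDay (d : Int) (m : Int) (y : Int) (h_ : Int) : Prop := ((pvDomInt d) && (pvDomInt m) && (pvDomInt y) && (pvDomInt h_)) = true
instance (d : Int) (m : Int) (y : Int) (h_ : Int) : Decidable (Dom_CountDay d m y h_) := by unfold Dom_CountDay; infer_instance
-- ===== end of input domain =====

-- B replaces A's two per-branch loops by one day-of-year prefix accumulation and two
-- closed-form expressions (objective: simpler); on h==0 with non-positive m B returns the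
-- intended day-of-year value instead of A's negative-index-wraparound artefact (see D_).

-- ===== PORT A =====
-- month list after the leap adjustment of month[1] (f(y) = y - 543; '%' on a positive
-- divisor agrees between Python and Lean's Int.emod)
def pvMonthA (y : Int) : List Int :=
  let g := y - 543
  [31, if g % 400 == 0 || (g % 4 == 0 && g % 100 != 0) then (29 : Int) else 28,
   31, 30, 31, 30, 31, 31, 30, 31, 30, 31]

-- A's 'while m < len(month): day += month[m]; m += 1' (fuel (12 - m).toNat = exact
-- number of iterations; the loop body and state are A's)
def pvLoopAAux (month : List Int) : Nat → Int → Int → Int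
  | 0, _, day => day
  | Nat.succ k, m, day => pvLoopAAux month k (m + 1) (day + PySem.List.pyGetD month m 0)

def pvLoopA (month : List Int) (m : Int) (day : Int) : Int :=
  pvLoopAAux month (12 - m).toNat m day

def CountDay (d : Int) (m : Int) (y : Int) (h_ : Int) : Int :=
  let month := pvMonthA y
  if h_ == 0 then
    pvLoopA month m (PySem.List.pyGetD month (m - 1) 0 - d + 1)
  else
    (PySem.List.pyRange 0 (m - 1) 1).foldl (fun day i => day + PySem.List.pyGetD month i 0) (d - 1)

-- ===== PORT B =====
def pvMonthB (y : Int) : List Int :=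
  let g := y - 543
  [31, if g % 400 == 0 || (g % 4 == 0 && g % 100 != 0) then (29 : Int) else 28,
   31, 30, 31, 30, 31, 31, 30, 31, 30, 31]

def CountDay_alt (d : Int) (m : Int) (y : Int) (h_ : Int) : Int :=
  let month := pvMonthB y
  let doy := d + (PySem.List.pyRange 0 (m - 1) 1).foldl (fun acc i => acc + PySem.List.pyGetD month i 0) 0
  let total := month.foldl (· + ·) 0
  if h_ == 0 then total - doy + 1 else doy - 1

-- ===== PRECONDITION & SPEC =====
-- Pre_ excludes exactly the inputs where Python A raises IndexError:
-- with h==0, month[m-1] / month[m] need -11 ≤ m ≤ 12; with h≠0 the for-loop reaches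
-- month[12] as soon as m ≥ 14.
def Pre_CountDay (d : Int) (m : Int) (y : Int) (h_ : Int) : Prop :=
  (h_ = 0 → (-11 ≤ m ∧ m ≤ 12)) ∧ (h_ ≠ 0 → m ≤ 13)
instance (d : Int) (m : Int) (y : Int) (h_ : Int) : Decidable (Pre_CountDay d m y h_) := by
  unfold Pre_CountDay; infer_instance

def pvWitness_CountDay : Int × Int × Int × Int := (5, 3, 2564, 1)

-- For h==0 with non-positive m (A still returns, via Python negative-index wraparound),
-- A over-counts by adding wrapped months; B returns total - doy + 1, the consistent
-- day-of-year value, which is the intended one.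
def D_CountDay (d : Int) (m : Int) (y : Int) (h_ : Int) : Prop := h_ = 0 ∧ m ≤ 0
instance (d : Int) (m : Int) (y : Int) (h_ : Int) : Decidable (D_CountDay d m y h_) := by
  unfold D_CountDay; infer_instance

def Spec_CountDay (d : Int) (m : Int) (y : Int) (h_ : Int) (out : Int) : Prop :=
  ¬ D_CountDay d m y h_ → out = CountDay_alt d m y h_
instance (d : Int) (m : Int) (y : Int) (h_ : Int) (out : Int) : Decidable (Spec_CountDay d m y h_ out) := by
  unfold Spec_CountDay; infer_instance

def pvDiffWitness_CountDay : Int × Int × Int × Int := (5, 0, 2564, 0)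
def pvDiffWitnessOut_CountDay : Int × Int := (392, 361)

-- ===== CLAIM (what is proved, stated in full; the proofs are below) =====
def Claim_unchanged_CountDay : Prop := ∀ (d : Int) (m : Int) (y : Int) (h_ : Int), Dom_CountDay d m y h_ → Pre_CountDay d m y h_ → Spec_CountDay d m y h_ (CountDay d m y h_)
def Claim_changed_CountDay : Prop := Dom_CountDay (pvDiffWitness_CountDay.1) (pvDiffWitness_CountDay.2.1) (pvDiffWitness_CountDay.2.2.1) (pvDiffWitness_CountDay.2.2.2) ∧ Pre_CountDay (pvDiffWitness_CountDay.1) (pvDiffWitness_CountDay.2.1) (pvDiffWitness_CountDay.2.2.1) (pvDiffWitness_CountDay.2.2.2) ∧ D_CountDay (pvDiffWitness_CountDay.1) (pvDiffWitness_CountDay.2.1) (pvDiffWitness_CountDay.2.2.1) (pvDiffWitness_CountDay.2.2.2) ∧ CountDay (pvDiffWitness_CountDay.1) (pvDiffWitness_CountDay.2.1) (pvDiffWitness_CountDay.2.2.1) (pvDiffWitness_CountDay.2.2.2) = pvDiffWitnessOut_CountDay.1 ∧ CountDay_alt (pvDiffWitness_CountDay.1) (pvDiffWitness_CountDay.2.1)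 (pvDiffWitness_CountDay.2.2.1) (pvDiffWitness_CountDay.2.2.2) = pvDiffWitnessOut_CountDay.2 ∧ pvDiffWitnessOut_CountDay.1 ≠ pvDiffWitnessOut_CountDay.2
def Claim_exact_CountDay : Prop := ∀ (d : Int) (m : Int) (y : Int) (h_ : Int), Dom_CountDay d m y h_ → Pre_CountDay d m y h_ → D_CountDay d m y h_ → CountDay d m y h_ ≠ CountDay_alt d m y h_

-- ===== LEMMAS AND PROOFS =====

-- pull a fold's initial accumulator out of an additive fold
theorem pvFoldl_add_init (g : Int → Int) (l : List Int) (init : Int) :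
    l.foldl (fun a i => a + g i) init = init + l.foldl (fun a i => a + g i) 0 := by
  induction l generalizing init with
  | nil => simp
  | cons x xs ih =>
      simp only [List.foldl_cons]
      rw [ih (init + g x), ih (0 + g x)]
      ring

-- ===== VERDICT (by name: the statement is the Claim_ definition above) =====
theorem CountDay_spec : Claim_unchanged_CountDay := by
  intro d m y h_ _hdom hpre hnd
  obtain ⟨h0, h1⟩ := hpre
  by_cases hh : h_ = 0
  · subst hh
    have hm1 : 1 ≤ m := by
      by_contra hc
      exact hnd ⟨rfl, by omega⟩
    have hm2 : m ≤ 12 := (h0 rfl).2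
    simp only [CountDay, CountDay_alt, pvMonthA, pvMonthB, BEq.rfl, if_true]
    generalize (if ((y - 543) % 400 == 0 || ((y - 543) % 4 == 0 && (y - 543) % 100 != 0)) = true then (29:Int) else 28) = feb
    interval_cases m <;>
      simp [pvLoopA, pvLoopAAux, PySem.List.pyGetD, PySem.List.pyGet?, PySem.List.pyIdx?,
            PySem.List.pyRange_one, List.range_succ] <;> ring
  · have hb : (h_ == 0) = false := by simpa using hh
    simp only [CountDay, CountDay_alt, pvMonthA, pvMonthB, hb, Bool.false_eq_true, if_false]
    rw [pvFoldl_add_init]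
    ring

theorem CountDay_changed : Claim_changed_CountDay := by
  unfold Claim_changed_CountDay
  refine ⟨by decide, by decide, by decide, ?_, ?_, by decide⟩
  · show CountDay 5 0 2564 0 = 392
    decide
  · show CountDay_alt 5 0 2564 0 = 361
    decide

theorem CountDay_tight : Claim_exact_CountDay := by
  intro d m y h_ _hdom hpre hd
  obtain ⟨hh, hm2⟩ := hd
  subst hh
  have hm1 : -11 ≤ m := (hpre.1 rfl).1
  simp only [CountDay, CountDay_alt, pvMonthA, pvMonthB, BEq.rfl, if_true]
  have hfeb : (if ((y - 543) % 400 == 0 || ((y - 543) % 4 == 0 && (y - 543) % 100 != 0)) = true then (29:Int) else 28) = 29 ∨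
      (if ((y - 543) % 400 == 0 || ((y - 543) % 4 == 0 && (y - 543) % 100 != 0)) = true then (29:Int) else 28) = 28 := by
    split_ifs <;> simp
  generalize (if ((y - 543) % 400 == 0 || ((y - 543) % 4 == 0 && (y - 543) % 100 != 0)) = true then (29:Int) else 28) = feb at hfeb ⊢
  interval_cases m <;>
      simp [pvLoopA, pvLoopAAux, PySem.List.pyGetD, PySem.List.pyGet?,
            PySem.List.pyIdx?] <;> omega
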